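-- pv_equiv track=rewrite | github.com/jfalkenstein/BoardGameTournament | gametournament/rank_scorer.py | normalize_ranks
-- ===== SOURCE A (Python) =====
-- from collections import defaultdict
--
-- def normalize_ranks(ranks) -> list[tuple[int, int]]:
--     sorted_by_rank = sorted(ranks, key=lambda x: x[1])
--     next_tier = len(ranks)
--     last_seen_rank = None
--     tiers = defaultdict(list)
--
--     for player_index in range(len(ranks) - 1, -1, -1):
--         player_id, rank = sorted_by_rank[player_index]
--         if rank != last_seen_rank:
--             next_tier -= 1
--         tiers[next_tier].append(player_id)
--         last_seen_rank = rank
--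
--     sorted_tiers = sorted(tiers.keys())
--     normalized_ranks = []
--
--     top_tier = sorted_tiers.pop()
--     for player_id in tiers[top_tier]:
--         normalized_ranks.append((player_id, len(ranks)))
--
--     for i, tier in enumerate(sorted_tiers):
--         for player_id in tiers[tier]:
--             normalized_ranks.append((player_id, i+1))
--
--     return normalized_ranks
-- ===== SOURCE B (Python) =====
-- def normalize_ranks(ranks) -> list[tuple[int, int]]:
--     # Scores come from the position of each distinct rank value; each tier's
--     # players are picked out of the reversed input by filtering, so the players
--     # are never sorted and no grouping pass or tier dict is built.
--     n = len(ranks)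
--     distinct = sorted({r for _, r in ranks})
--     rev = ranks[::-1]
--     top = distinct[-1]                      # IndexError on empty input, as in A
--     out = [(p, n) for p, r in rev if r == top]
--     for i, d in enumerate(distinct[:-1]):
--         out.extend((p, i + 1) for p, r in rev if r == d)
--     return out
-- ===== Notes on version B (the rewrite author's own statement) =====
-- stated objective: alternative
-- what changed: Instead of sorting the players, grouping them with a reverse-index countdown into a tier dict and re-sorting its keys, B sorts only the set of distinct rank values and selects each tier's players by filtering the reversed input, reading the score off the rank's position in that list.
import Mathlib
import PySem

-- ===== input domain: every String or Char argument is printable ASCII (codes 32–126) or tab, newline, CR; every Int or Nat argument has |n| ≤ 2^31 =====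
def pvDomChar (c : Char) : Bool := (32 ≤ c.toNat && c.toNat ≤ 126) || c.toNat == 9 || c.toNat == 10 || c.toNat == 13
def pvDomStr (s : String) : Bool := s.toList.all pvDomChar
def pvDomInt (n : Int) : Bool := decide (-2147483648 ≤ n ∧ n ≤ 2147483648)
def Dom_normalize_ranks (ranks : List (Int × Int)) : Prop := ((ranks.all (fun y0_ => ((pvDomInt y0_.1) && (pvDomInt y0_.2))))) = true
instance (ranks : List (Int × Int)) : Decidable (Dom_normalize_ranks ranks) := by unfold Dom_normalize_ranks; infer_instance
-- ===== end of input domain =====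

-- B computes each tier's score from the position of its rank among the sorted distinct
-- rank values and picks each tier's players by filtering the reversed input, so it never
-- sorts the players and builds no grouping pass or tier dict (alternative decomposition).

-- ===== PORT A =====
def normalize_ranks (ranks : List (Int × Int)) : List (Int × Int) :=
  let sorted_by_rank := PySem.List.sorted ranks (fun x => x.2) false
  let n : Int := ranks.length
  let st := (PySem.List.pyRange (n - 1) (-1) (-1)).foldl
    (fun (st : Int × Option Int × PySem.Dict Int (List Int)) player_index =>
      let pr := PySem.List.pyGetD sorted_by_rank player_index (0, 0)
      let next_tier := if (some pr.2) ≠ st.2.1 then st.1 - 1 else st.1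
      (next_tier, some pr.2, st.2.2.modify next_tier [] (· ++ [pr.1])))
    (n, (none : Option Int), (PySem.Dict.empty : PySem.Dict Int (List Int)))
  let sorted_tiers := PySem.List.sorted st.2.2.keys (fun x => x) false
  match PySem.List.pop? sorted_tiers (-1) with
  | none => []   -- Python raises IndexError here (only on the empty input); excluded by Pre_
  | some (top_tier, rest) =>
    let first := (st.2.2.getD top_tier []).map (fun player_id => (player_id, n))
    first ++ (PySem.List.enumerate rest 0).flatMap
      (fun it => (st.2.2.getD it.2 []).map (fun player_id => (player_id, it.1 + 1)))

-- ===== PORT B =====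
def normalize_ranks_alt (ranks : List (Int × Int)) : List (Int × Int) :=
  let n : Int := ranks.length
  let distinct := PySem.List.sorted (PySem.Set.ofList (ranks.map (fun x => x.2))) (fun x => x) false
  let rev := (PySem.List.slice? ranks none none (-1)).getD []   -- ranks[::-1]; step -1 never raises
  match PySem.List.pyGet? distinct (-1) with
  | none => []   -- distinct[-1]: IndexError on the empty input; excluded by Pre_
  | some top =>
    let out := (rev.filter (fun x => x.2 == top)).map (fun x => (x.1, n))
    (PySem.List.enumerate (PySem.List.slice distinct none (some (-1))) 0).foldl
      (fun out it => out ++ (rev.filter (fun x => x.2 == it.2)).map (fun x => (x.1, it.1 + 1)))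
      out

-- ===== PRECONDITION & SPEC =====
-- Pre_ excludes only the empty list, on which A raises IndexError (pop from the empty tier-key list).
def Pre_normalize_ranks (ranks : List (Int × Int)) : Prop := ranks ≠ []
instance (ranks : List (Int × Int)) : Decidable (Pre_normalize_ranks ranks) := by unfold Pre_normalize_ranks; infer_instance
def pvWitness_normalize_ranks : (List (Int × Int)) := [(1, 3), (2, 1), (3, 3)]

def Spec_normalize_ranks (ranks : List (Int × Int)) (out : List (Int × Int)) : Prop := out = normalize_ranks_alt ranks
instance (ranks : List (Int × Int)) (out : List (Int × Int)) : Decidable (Spec_normalize_ranks ranks out) := by unfold Spec_normalize_ranks; infer_instance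

-- ===== CLAIM (what is proved, stated in full; the proofs are below) =====
def Claim_equal_normalize_ranks : Prop := ∀ (ranks : List (Int × Int)), Dom_normalize_ranks ranks → Pre_normalize_ranks ranks → Spec_normalize_ranks ranks (normalize_ranks ranks)

-- ===== LEMMAS AND PROOFS =====

/-- Reference grouping: continue the current group `cur` (nonempty, of rank `r`)
through the rest of the list; returns (completed groups, last group, last rank). -/
def groupsC (cur : List Int) (r : Int) : List (Int × Int) → List (List Int) × List Int × Int
  | [] => ([], cur, r)
  | (p, r') :: t =>
    if r' = r then groupsC (cur ++ [p]) r t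
    else
      let rest := groupsC [p] r' t
      (cur :: rest.1, rest.2.1, rest.2.2)

/-- The ascending list of equal-rank groups of a nonempty list. -/
def pyGroups (p : Int) (r : Int) (t : List (Int × Int)) : List (List Int) :=
  let g := groupsC [p] r t
  g.1 ++ [g.2.1]

/-- The ascending list of distinct ranks of a nonempty (sorted) list `(· , r) :: t`. -/
def keysC (r : Int) : List (Int × Int) → List Int
  | [] => [r]
  | (_, r') :: t => if r' = r then keysC r t else r :: keysC r' t

-- reference loop body (the grouping pass both ports are reduced to)
def bodyB (st : List (List Int) × List Int × Option Int) (pr : Int × Int) :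
    List (List Int) × List Int × Option Int :=
  let gc := if st.2.1 ≠ [] ∧ some pr.2 ≠ st.2.2 then (st.1 ++ [st.2.1], ([] : List Int)) else (st.1, st.2.1)
  (gc.1, gc.2 ++ [pr.1], some pr.2)

-- A-side loop body (element form)
def bodyA (st : Int × Option Int × PySem.Dict Int (List Int)) (pr : Int × Int) :
    Int × Option Int × PySem.Dict Int (List Int) :=
  let next_tier := if (some pr.2) ≠ st.2.1 then st.1 - 1 else st.1
  (next_tier, some pr.2, st.2.2.modify next_tier [] (· ++ [pr.1]))

theorem foldB_eq (t : List (Int × Int)) :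
    ∀ (gs : List (List Int)) (cur : List Int) (r : Int), cur ≠ [] →
    t.foldl bodyB (gs, cur, some r) =
      ((gs ++ (groupsC cur r t).1, (groupsC cur r t).2.1, some (groupsC cur r t).2.2)) := by
  induction t with
  | nil => intro gs cur r h; simp [groupsC]
  | cons x t ih =>
    intro gs cur r h
    obtain ⟨p, r'⟩ := x
    by_cases hr : r' = r
    · subst hr
      have hcond : ¬(cur ≠ [] ∧ some r' ≠ some r') := by simp
      simp only [List.foldl_cons, bodyB, if_neg hcond, groupsC]
      exact ih gs (cur ++ [p]) r' (by simp)
    · have hcond : (cur ≠ [] ∧ some r' ≠ some r) := ⟨h, by simp [hr]⟩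
      simp only [List.foldl_cons, bodyB, if_pos hcond, groupsC, if_neg hr, List.nil_append]
      rw [ih (gs ++ [cur]) [p] r' (by simp)]
      simp

-- Dict items produced by A's loop: key n-1 for the head of `Grev` (the last
-- ascending group, inserted first), then descending keys; values are the groups reversed.
def ritems : List (List Int) → Int → List (Int × List Int)
  | [], _ => []
  | c :: rest, n => (n - 1, c.reverse) :: ritems rest (n - 1)

theorem ritems_append (xs : List (List Int)) (c : List Int) (n : Int) :
    ritems (xs ++ [c]) n = ritems xs n ++ [(n - xs.length - 1, c.reverse)] := by
  induction xs generalizing n with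
  | nil => simp [ritems]
  | cons d rest ih =>
    simp only [List.cons_append, ritems, ih]
    have h : n - 1 - (rest.length : Int) - 1 = n - ((rest.length + 1 : Nat) : Int) - 1 := by
      push_cast; ring
    rw [h, List.length_cons]

theorem mem_ritems_bound (xs : List (List Int)) (n : Int) (pr : Int × List Int)
    (h : pr ∈ ritems xs n) : n - xs.length ≤ pr.1 ∧ pr.1 ≤ n - 1 := by
  induction xs generalizing n with
  | nil => simp [ritems] at h
  | cons c rest ih =>
    simp only [ritems, List.mem_cons] at h
    rcases h with h | h
    · subst h; simp only [List.length_cons]; omega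
    · have := ih (n - 1) h
      simp only [List.length_cons]
      push_cast at this
      omega

theorem map_fst_ritems (xs : List (List Int)) (n : Int) :
    (ritems xs n).map (·.1) = (PySem.List.pyRange (n - xs.length) n).reverse := by
  induction xs generalizing n with
  | nil => simp [ritems, PySem.List.pyRange_one_eq_nil]
  | cons c rest ih =>
    have h1 : (n : Int) - (c :: rest).length = n - 1 - rest.length := by
      simp; ring
    have h2 : PySem.List.pyRange (n - 1 - rest.length) n
        = PySem.List.pyRange (n - 1 - rest.length) (n - 1) ++ [n - 1] := by
      have := PySem.List.pyRange_one_succ_right (a := n - 1 - rest.length) (b := n - 1) (by omega)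
      simpa using this
    simp only [ritems, List.map_cons, ih, h1, h2, List.reverse_append]
    rfl

theorem lookup_ritems (xs : List (List Int)) (n : Int) (j : Nat) (hj : j < xs.length) :
    (PySem.Dict.mk (ritems xs n)).getD (n - 1 - j) [] = (xs[j]).reverse := by
  induction xs generalizing n j with
  | nil => simp at hj
  | cons c rest ih =>
    match j with
    | 0 => simp [ritems, PySem.Dict.getD, PySem.Dict.get?]
    | j + 1 =>
      have hne : ¬((n - 1 : Int) == n - 1 - (j + 1 : Nat)) := by
        simp; omega
      have hj' : j < rest.length := by simpa using hj
      have := ih (n - 1) j hj'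
      simp only [ritems, PySem.Dict.getD, PySem.Dict.get?] at this ⊢
      rw [List.find?_cons_of_neg (by simpa using hne)]
      have harg : (n : Int) - 1 - 1 - j = n - 1 - (j + 1 : Nat) := by push_cast; ring
      rw [harg] at this
      exact this

theorem groupsC_cons_cur (t : List (Int × Int)) :
    ∀ (cur : List Int) (r : Int) (x : Int),
    groupsC (x :: cur) r t =
      (match groupsC cur r t with
       | ([], c, lr) => ([], x :: c, lr)
       | (g :: gr, c, lr) => ((x :: g) :: gr, c, lr)) := by
  induction t with
  | nil => intro cur r x; simp [groupsC]
  | cons y t ih =>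
    intro cur r x
    obtain ⟨p, r'⟩ := y
    by_cases hr : r' = r
    · simp only [groupsC, if_pos hr, List.cons_append]
      exact ih (cur ++ [p]) r x
    · simp only [groupsC, if_neg hr]

theorem pyGroups_extend (t : List (Int × Int)) (q r p : Int) :
    ∃ h tl, pyGroups q r t = h :: tl ∧ pyGroups p r ((q, r) :: t) = (p :: h) :: tl := by
  have hc : groupsC [p] r ((q, r) :: t) =
      (match groupsC [q] r t with
       | ([], c, lr) => ([], p :: c, lr)
       | (g :: gr, c, lr) => ((p :: g) :: gr, c, lr)) := by
    have := groupsC_cons_cur t [q] r p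
    simpa [groupsC] using this
  rcases hgs : groupsC [q] r t with ⟨gs, c, lr⟩
  rw [hgs] at hc
  cases gs with
  | nil =>
    exact ⟨c, [], by simp [pyGroups, hgs], by simp [pyGroups, hc]⟩
  | cons g gr =>
    exact ⟨g, gr ++ [c], by simp [pyGroups, hgs], by simp [pyGroups, hc]⟩

theorem pyGroups_new (t : List (Int × Int)) (q r' p r : Int) (hr : r ≠ r') :
    pyGroups p r ((q, r') :: t) = [p] :: pyGroups q r' t := by
  simp [pyGroups, groupsC, if_neg (Ne.symm hr)]

theorem nodup_keys_ritems (xs : List (List Int)) (n : Int) :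
    ((ritems xs n).map (·.1)).Nodup := by
  rw [map_fst_ritems]
  exact List.nodup_reverse.mpr (PySem.List.nodup_pyRange_one _ _)

theorem foldA_eq (t : List (Int × Int)) :
    ∀ (p r n : Int),
    ((p, r) :: t).foldr (fun x st => bodyA st x)
        (n, (none : Option Int), (PySem.Dict.empty : PySem.Dict Int (List Int))) =
      (n - (pyGroups p r t).length, some r,
        PySem.Dict.mk (ritems (pyGroups p r t).reverse n)) := by
  induction t with
  | nil =>
    intro p r n
    simp [bodyA, pyGroups, groupsC, ritems, PySem.Dict.modify, PySem.Dict.insert,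
          PySem.Dict.empty, PySem.Dict.getD, PySem.Dict.get?, PySem.Dict.contains]
  | cons y t ih =>
    intro p r n
    obtain ⟨q, r'⟩ := y
    rw [List.foldr_cons, ih q r' n]
    by_cases hr : r = r'
    · subst hr
      obtain ⟨h, tl, hq, hp⟩ := pyGroups_extend t q r p
      have hlen : (pyGroups p r ((q, r) :: t)).length = (pyGroups q r t).length := by
        rw [hq, hp]; simp
      have hrev : (pyGroups q r t).reverse = tl.reverse ++ [h] := by rw [hq]; simp
      have hitems' : ritems (pyGroups q r t).reverse n
          = ritems tl.reverse n ++ [(n - (pyGroups q r t).length, h.reverse)] := by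
        rw [hrev, ritems_append]
        have : n - (tl.reverse.length : Int) - 1 = n - (pyGroups q r t).length := by
          rw [hq]; simp; ring
        rw [this]
      have hmem : (n - ((pyGroups q r t).length : Int), h.reverse)
          ∈ (ritems (pyGroups q r t).reverse n) := by
        rw [hitems']; simp
      have hnodup : (PySem.Dict.mk (ritems (pyGroups q r t).reverse n)).keys.Nodup := by
        simpa [PySem.Dict.keys] using nodup_keys_ritems (pyGroups q r t).reverse n
      have hgetD : (PySem.Dict.mk (ritems (pyGroups q r t).reverse n)).getD
          (n - (pyGroups q r t).length) [] = h.reverse :=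
        PySem.Dict.getD_of_mem_items _ hmem hnodup []
      have hcontains : (PySem.Dict.mk (ritems (pyGroups q r t).reverse n)).contains
          (n - (pyGroups q r t).length) = true := by
        simp only [PySem.Dict.contains]
        refine List.any_eq_true.mpr ⟨_, hmem, by simp⟩
      have hdict : (PySem.Dict.mk (ritems (pyGroups q r t).reverse n)).modify
            (n - (pyGroups q r t).length) [] (· ++ [p])
          = PySem.Dict.mk (ritems (pyGroups p r ((q, r) :: t)).reverse n) := by
        apply PySem.Dict.ext
        rw [PySem.Dict.modify, hgetD, PySem.Dict.items_insert_of_contains _ _ hcontains]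
        have htarget : ritems (pyGroups p r ((q, r) :: t)).reverse n
            = ritems tl.reverse n ++ [(n - (pyGroups q r t).length, h.reverse ++ [p])] := by
          rw [hp]
          have : ((p :: h) :: tl).reverse = tl.reverse ++ [p :: h] := by simp
          rw [this, ritems_append]
          have hk : n - (tl.reverse.length : Int) - 1 = n - (pyGroups q r t).length := by
            rw [hq]; simp; ring
          rw [hk]; simp
        rw [htarget]
        have hsrc : (PySem.Dict.mk (ritems (pyGroups q r t).reverse n)).items
            = ritems tl.reverse n ++ [(n - (pyGroups q r t).length, h.reverse)] := by
          simpa using hitems'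
        rw [hsrc, List.map_append]
        congr 1
        · refine (List.map_congr_left ?_).trans (List.map_id _)
          intro pr hpr
          have hb := mem_ritems_bound tl.reverse n pr hpr
          have hlt : n - ((pyGroups q r t).length : Int) < pr.1 := by
            rw [hq] at *; simp at hb ⊢; omega
          simp only [id]
          rw [if_neg (by simp; omega)]
        · simp
      simp only [bodyA]
      rw [if_neg (by simp)]
      rw [hlen, hdict]
    · rw [pyGroups_new t q r' p r hr]
      have hlen : (([p] :: pyGroups q r' t).length : Int) = (pyGroups q r' t).length + 1 := by
        simp
      have hfresh : ∀ pr ∈ ritems (pyGroups q r' t).reverse n,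
          n - ((pyGroups q r' t).length : Int) ≤ pr.1 := by
        intro pr hpr
        have := mem_ritems_bound _ n pr hpr
        simpa using this.1
      have hnotmem : (n - ((pyGroups q r' t).length : Int) - 1)
          ∉ (PySem.Dict.mk (ritems (pyGroups q r' t).reverse n)).keys := by
        simp only [PySem.Dict.keys, List.mem_map]
        rintro ⟨pr, hpr, hk⟩
        have := hfresh pr hpr
        omega
      have hcontains : (PySem.Dict.mk (ritems (pyGroups q r' t).reverse n)).contains
          (n - (pyGroups q r' t).length - 1) = false := by
        rw [PySem.Dict.contains_eq_decide_mem_keys]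
        simpa using hnotmem
      have hgetD : (PySem.Dict.mk (ritems (pyGroups q r' t).reverse n)).getD
          (n - (pyGroups q r' t).length - 1) [] = [] := by
        rw [PySem.Dict.getD, (PySem.Dict.get?_eq_none_iff_not_mem_keys _ _).mpr hnotmem]
        rfl
      have hdict : (PySem.Dict.mk (ritems (pyGroups q r' t).reverse n)).modify
            (n - (pyGroups q r' t).length - 1) [] (· ++ [p])
          = PySem.Dict.mk (ritems ([p] :: pyGroups q r' t).reverse n) := by
        apply PySem.Dict.ext
        rw [PySem.Dict.modify, hgetD, PySem.Dict.items_insert_of_not_contains _ _ hcontains]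
        have : ([p] :: pyGroups q r' t).reverse = (pyGroups q r' t).reverse ++ [[p]] := by simp
        rw [this, ritems_append]
        simp
      simp only [bodyA]
      rw [if_pos (by simp [hr])]
      have harith : n - (pyGroups q r' t).length - 1 = n - (([p] :: pyGroups q r' t).length) := by
        simp; ring
      rw [hdict]
      simp only [harith]

-- The two ports, abstracted over the sorted list `s` / distinct keys and the length `n`.
def AbodyF (s : List (Int × Int)) (n : Int) : List (Int × Int) :=
  let st := (PySem.List.pyRange (n - 1) (-1) (-1)).foldl
      (fun st i => bodyA st (PySem.List.pyGetD s i (0, 0)))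
      (n, (none : Option Int), (PySem.Dict.empty : PySem.Dict Int (List Int)))
  let sorted_tiers := PySem.List.sorted st.2.2.keys (fun x => x) false
  match PySem.List.pop? sorted_tiers (-1) with
  | none => []
  | some (top_tier, rest) =>
    (st.2.2.getD top_tier []).map (fun pl => (pl, n)) ++
      (PySem.List.enumerate rest 0).flatMap
        (fun it => (st.2.2.getD it.2 []).map (fun pl => (pl, it.1 + 1)))

def BbodyF (s : List (Int × Int)) (n : Int) : List (Int × Int) :=
  let st := s.foldl bodyB ([], [], none)
  st.2.1.reverse.map (fun p => (p, n)) ++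
    (PySem.List.enumerate st.1 0).flatMap (fun it => it.2.reverse.map (fun p => (p, it.1 + 1)))

theorem normalize_ranks_eq_AbodyF (ranks : List (Int × Int)) :
    normalize_ranks ranks
      = AbodyF (PySem.List.sorted ranks (fun x => x.2) false) ranks.length := rfl

theorem flatMap_enumerate_congr {α β γ : Type} (F : Int → α → List γ) (G : Int → β → List γ) :
    ∀ (xs : List α) (ys : List β) (st : Int), xs.length = ys.length →
    (∀ (k : Nat) (h1 : k < xs.length) (h2 : k < ys.length), F (st + k) (xs[k]) = G (st + k) (ys[k])) →
    (PySem.List.enumerate xs st).flatMap (fun it => F it.1 it.2)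
      = (PySem.List.enumerate ys st).flatMap (fun it => G it.1 it.2) := by
  intro xs
  induction xs with
  | nil =>
    intro ys st hlen _
    cases ys with
    | nil => rfl
    | cons y ys => simp at hlen
  | cons x xs ih =>
    intro ys st hlen hpt
    cases ys with
    | nil => simp at hlen
    | cons y ys =>
      simp only [PySem.List.enumerate_cons, List.flatMap_cons]
      have h0 := hpt 0 (by simp) (by simp)
      simp only [List.getElem_cons_zero, Nat.cast_zero, add_zero] at h0
      rw [h0]
      congr 1
      refine ih ys (st + 1) (by simpa using hlen) ?_
      intro k hk1 hk2
      have := hpt (k + 1) (by simpa using hk1) (by simpa using hk2)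
      simp only [List.getElem_cons_succ] at this
      have harith : st + 1 + (k : Int) = st + ((k + 1 : Nat) : Int) := by push_cast; ring
      rw [harith]
      exact this

theorem pyGroups_eq (p r : Int) (t : List (Int × Int)) :
    pyGroups p r t = (groupsC [p] r t).1 ++ [(groupsC [p] r t).2.1] := rfl

theorem lookup_ascending (G : List (List Int)) (n : Int) (k : Nat) (hk : k < G.length) :
    (PySem.Dict.mk (ritems G.reverse n)).getD (n - G.length + k) [] = (G[k]).reverse := by
  have hj : G.length - 1 - k < G.reverse.length := by simp; omega
  have hlr := lookup_ritems G.reverse n (G.length - 1 - k) hj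
  have hkey : n - 1 - ((G.length - 1 - k : Nat) : Int) = n - G.length + k := by omega
  rw [hkey] at hlr
  rw [hlr]
  congr 1
  rw [List.getElem_reverse]
  congr 1
  omega

theorem body_eq (s : List (Int × Int)) (n : Int) (hn : n = (s.length : Int)) (hs : s ≠ []) :
    AbodyF s n = BbodyF s n := by
  obtain ⟨⟨p, r⟩, t, rfl⟩ := List.exists_cons_of_ne_nil hs
  have hlen : PySem.List.len ((p, r) :: t) = n := by rw [hn]; rfl
  have hfold : (PySem.List.pyRange (n - 1) (-1) (-1)).foldl
      (fun st i => bodyA st (PySem.List.pyGetD ((p, r) :: t) i (0, 0)))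
      (n, (none : Option Int), (PySem.Dict.empty : PySem.Dict Int (List Int)))
      = ((p, r) :: t).foldr (fun x st => bodyA st x)
        (n, (none : Option Int), (PySem.Dict.empty : PySem.Dict Int (List Int))) := by
    have h1 : PySem.List.pyRange (n - 1) (-1) (-1) = (PySem.List.pyRange 0 n).reverse := by
      have h2 := PySem.List.pyRange_neg_one_eq_reverse (n - 1) (-1)
      norm_num at h2
      exact h2
    rw [h1, List.foldl_reverse]
    conv_rhs => rw [← PySem.List.map_pyGetD_pyRange_zero ((p, r) :: t) (0, 0)]
    rw [hlen, List.foldr_map]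
  rw [AbodyF, BbodyF, hfold, foldA_eq t p r n]
  have hB : ((p, r) :: t).foldl bodyB ([], [], none)
      = ((groupsC [p] r t).1, (groupsC [p] r t).2.1, some (groupsC [p] r t).2.2) := by
    have h0 : bodyB ([], [], none) (p, r) = ([], [p], some r) := by simp [bodyB]
    rw [List.foldl_cons, h0, foldB_eq t [] [p] r (by simp)]
    simp
  rw [hB, pyGroups_eq p r t]
  set gs := (groupsC [p] r t).1 with hgs
  set c := (groupsC [p] r t).2.1 with hc
  have hglen : ((gs ++ [c]).length : Int) = (gs.length : Int) + 1 := by simp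
  have hkeys : (PySem.Dict.mk (ritems (gs ++ [c]).reverse n)).keys
      = (PySem.List.pyRange (n - (gs ++ [c]).length) n).reverse := by
    have h3 := map_fst_ritems (gs ++ [c]).reverse n
    simpa [PySem.Dict.keys] using h3
  have hsorted : PySem.List.sorted (PySem.Dict.mk (ritems (gs ++ [c]).reverse n)).keys
        (fun x => x) false
      = PySem.List.pyRange (n - (gs ++ [c]).length) n := by
    apply PySem.List.sorted_eq_of_perm_of_pairwise_lt
    · rw [hkeys]; exact (List.reverse_perm _).symm
    · exact PySem.List.pairwise_lt_pyRange_one _ _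
  have hsplit : PySem.List.pyRange (n - (gs ++ [c]).length) n
      = PySem.List.pyRange (n - (gs ++ [c]).length) (n - 1) ++ [n - 1] := by
    have h2 := PySem.List.pyRange_one_succ_right
      (a := n - (gs ++ [c]).length) (b := n - 1) (by rw [hglen]; omega)
    simpa [show n - 1 + 1 = n by ring] using h2
  have hpop : PySem.List.pop? (PySem.List.sorted
        (PySem.Dict.mk (ritems (gs ++ [c]).reverse n)).keys (fun x => x) false) (-1)
      = some (n - 1, PySem.List.pyRange (n - (gs ++ [c]).length) (n - 1)) := by
    rw [hsorted, hsplit]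
    exact PySem.List.pop?_last _ _
  rw [hpop]
  dsimp only
  congr 1
  · have h1 : n - 1 = n - (gs ++ [c]).length + ((gs.length : Nat) : Int) := by
      rw [hglen]; ring
    rw [h1, lookup_ascending (gs ++ [c]) n gs.length (by simp)]
    simp only [List.getElem_concat_length]
  · refine flatMap_enumerate_congr
      (fun i tier => ((PySem.Dict.mk (ritems (gs ++ [c]).reverse n)).getD tier []).map
        (fun pl => (pl, i + 1)))
      (fun i grp => grp.reverse.map (fun pl => (pl, i + 1)))
      (PySem.List.pyRange (n - (gs ++ [c]).length) (n - 1)) gs 0 ?_ ?_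
    · rw [PySem.List.length_pyRange_one, hglen]
      omega
    · intro k hk1 hk2
      have hxk : (PySem.List.pyRange (n - (gs ++ [c]).length) (n - 1))[k]
          = n - (gs ++ [c]).length + k :=
        PySem.List.getElem_pyRange_one _ _ _ hk1
      beta_reduce
      rw [hxk, lookup_ascending (gs ++ [c]) n k (by simp; omega)]
      simp [hk2]

-- ===== B side: distinct keys and stable-filter characterisation =====

theorem keysC_head (t : List (Int × Int)) : ∀ r, ∃ tl, keysC r t = r :: tl := by
  induction t with
  | nil => intro r; exact ⟨[], rfl⟩
  | cons x t ih =>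
    intro r
    obtain ⟨q, r'⟩ := x
    by_cases hr : r' = r
    · simpa [keysC, hr] using ih r
    · exact ⟨keysC r' t, by simp [keysC, hr]⟩

theorem keysC_mem (t : List (Int × Int)) : ∀ r d, d ∈ keysC r t ↔ d = r ∨ d ∈ t.map (·.2) := by
  induction t with
  | nil => intro r d; simp [keysC]
  | cons x t ih =>
    intro r d
    obtain ⟨q, r'⟩ := x
    by_cases hr : r' = r
    · subst hr
      rw [show keysC r' ((q, r') :: t) = keysC r' t from by simp [keysC], ih]
      simp only [List.map_cons, List.mem_cons]
      tauto
    · simp only [keysC, if_neg hr, List.mem_cons, ih, List.map_cons]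

theorem keysC_pairwise (t : List (Int × Int)) :
    ∀ r, t.Pairwise (fun a b => a.2 ≤ b.2) → (∀ x ∈ t, r ≤ x.2) →
    (keysC r t).Pairwise (· < ·) := by
  induction t with
  | nil => intro r _ _; simp [keysC]
  | cons x t ih =>
    intro r hp hge
    obtain ⟨q, r'⟩ := x
    rw [List.pairwise_cons] at hp
    by_cases hr : r' = r
    · subst hr
      simpa [keysC] using ih r' hp.2 (fun x hx => hp.1 x hx)
    · simp only [keysC, if_neg hr, List.pairwise_cons]
      have hrlt : r < r' := lt_of_le_of_ne (hge (q, r') (by simp)) (Ne.symm hr)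
      constructor
      · intro d hd
        rcases (keysC_mem t r' d).1 hd with h | h
        · omega
        · rcases List.mem_map.1 h with ⟨x, hx, rfl⟩
          have := hp.1 x hx
          omega
      · exact ih r' hp.2 (fun x hx => hp.1 x hx)

theorem pyGroups_eq_keys_filters (t : List (Int × Int)) :
    ∀ p r, ((p, r) :: t).Pairwise (fun a b => a.2 ≤ b.2) →
    pyGroups p r t = (keysC r t).map
      (fun d => ((((p, r) :: t)).filter (fun x => x.2 == d)).map (·.1)) := by
  induction t with
  | nil => intro p r _; simp [pyGroups, groupsC, keysC]
  | cons x t ih =>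
    intro p r hp
    obtain ⟨q, r'⟩ := x
    rw [List.pairwise_cons] at hp
    by_cases hr : r' = r
    · subst hr
      obtain ⟨h, tl, hq, hpg⟩ := pyGroups_extend t q r' p
      obtain ⟨tl', hK⟩ := keysC_head t r'
      have hih := ih q r' hp.2
      rw [hq, hK, List.map_cons] at hih
      have hh' : h = (((q, r') :: t).filter (fun x => x.2 == r')).map (·.1) :=
        (List.cons_eq_cons.mp hih).1
      have htl' : tl = tl'.map
          (fun d => (((q, r') :: t).filter (fun x => x.2 == d)).map (·.1)) :=
        (List.cons_eq_cons.mp hih).2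
      have hp2 := hp.2
      rw [List.pairwise_cons] at hp2
      have hkp : (keysC r' t).Pairwise (· < ·) :=
        keysC_pairwise t r' hp2.2 (fun x hx => hp2.1 x hx)
      rw [hK, List.pairwise_cons] at hkp
      rw [hpg]
      rw [show keysC r' ((q, r') :: t) = keysC r' t from by simp [keysC], hK, List.map_cons]
      congr 1
      · rw [hh']
        simp
      · rw [htl']
        refine List.map_congr_left ?_
        intro d hd
        have hdr : r' < d := hkp.1 d hd
        have hne : ¬((r' : Int) == d) = true := by simp; omega
        simp [hne]
    · rw [pyGroups_new t q r' p r (fun he => hr he.symm)]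
      simp only [keysC, if_neg hr, List.map_cons]
      have hr' : r < r' := lt_of_le_of_ne (hp.1 (q, r') (by simp)) (fun he => hr he.symm)
      have hp2 := hp.2
      rw [List.pairwise_cons] at hp2
      have hgt : ∀ x ∈ t, r' ≤ x.2 := fun x hx => hp2.1 x hx
      congr 1
      · -- the group of rank r is [p]: nothing later has key r
        have h1 : ((q, r') :: t).filter (fun x => x.2 == r) = [] := by
          refine List.filter_eq_nil_iff.mpr ?_
          intro x hx
          rcases List.mem_cons.1 hx with rfl | hx
          · simp; omega
          · have := hgt x hx; simp; omega
        simp [h1]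
      · rw [ih q r' hp.2]
        refine List.map_congr_left ?_
        intro d hd
        have hdge : r' ≤ d := by
          rcases (keysC_mem t r' d).1 hd with rfl | h
          · exact le_refl d
          · rcases List.mem_map.1 h with ⟨x, hx, rfl⟩
            exact hgt x hx
        have hne : ¬((r : Int) == d) = true := by simp; omega
        simp [hne]

-- stability of the sort with respect to a single-key filter
theorem filter_insertBy_ne (x : Int × Int) (ys : List (Int × Int)) (c : Int) (hx : x.2 ≠ c) :
    (PySem.List.insertBy (fun a b => decide (a.2 < b.2)) x ys).filter (fun z => z.2 == c)
      = ys.filter (fun z => z.2 == c) := by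
  induction ys with
  | nil => simp [PySem.List.insertBy, hx]
  | cons y ys ih =>
    by_cases h : x.2 < y.2
    · simp [PySem.List.insertBy, h, List.filter_cons, hx]
    · simp only [PySem.List.insertBy, decide_eq_true_eq, if_neg h, List.filter_cons]
      rw [ih]

theorem filter_insertBy_eq (x : Int × Int) (ys : List (Int × Int)) (c : Int) (hx : x.2 = c)
    (hs : ys.Pairwise (fun a b => a.2 ≤ b.2)) :
    (PySem.List.insertBy (fun a b => decide (a.2 < b.2)) x ys).filter (fun z => z.2 == c)
      = ys.filter (fun z => z.2 == c) ++ [x] := by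
  induction ys with
  | nil => simp [PySem.List.insertBy, hx]
  | cons y ys ih =>
    rw [List.pairwise_cons] at hs
    by_cases h : x.2 < y.2
    · have hnil : (y :: ys).filter (fun z => z.2 == c) = [] := by
        refine List.filter_eq_nil_iff.mpr ?_
        intro z hz
        rcases List.mem_cons.1 hz with rfl | hz
        · simp; omega
        · have := hs.1 z hz; simp; omega
      have hins : PySem.List.insertBy (fun a b => decide (a.2 < b.2)) x (y :: ys) = x :: y :: ys := by
        simp [PySem.List.insertBy, h]
      rw [hins, List.filter_cons, hnil]
      simp [hx]
    · simp only [PySem.List.insertBy, decide_eq_true_eq, if_neg h, List.filter_cons]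
      rw [ih hs.2]
      split <;> simp

theorem sorted_filter_stable (xs : List (Int × Int)) (c : Int) :
    (PySem.List.sorted xs (fun x => x.2) false).filter (fun z => z.2 == c)
      = xs.filter (fun z => z.2 == c) := by
  induction xs using List.reverseRecOn with
  | nil => rfl
  | append_singleton xs x ih =>
    have hstep : PySem.List.sorted (xs ++ [x]) (fun y => y.2) false
        = PySem.List.insertBy (fun a b => decide (a.2 < b.2)) x
            (PySem.List.sorted xs (fun y => y.2) false) := by
      rw [PySem.List.sorted_eq_foldl_insertBy, PySem.List.sorted_eq_foldl_insertBy,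
        List.foldl_append]
      rfl
    rw [hstep]
    by_cases hx : x.2 = c
    · rw [filter_insertBy_eq x _ c hx (PySem.List.sorted_pairwise xs (fun y => y.2)), ih,
        List.filter_append]
      simp [hx]
    · rw [filter_insertBy_ne x _ c hx, ih, List.filter_append]
      simp [hx]

-- one output segment, rewritten from the sorted list to the reversed input
theorem piece_eq (ranks : List (Int × Int)) (d i : Int) :
    ((((PySem.List.sorted ranks (fun x => x.2) false).filter (fun x => x.2 == d)).map
        (·.1)).reverse).map (fun p => (p, i))
      = (ranks.reverse.filter (fun x => x.2 == d)).map (fun x => (x.1, i)) := by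
  rw [sorted_filter_stable, ← List.map_reverse, List.map_map, ← List.filter_reverse]
  rfl

theorem pyGet?_neg_one_concat (xs : List Int) (a : Int) :
    PySem.List.pyGet? (xs ++ [a]) (-1) = some a := by
  simp [PySem.List.pyGet?, PySem.List.pyIdx?]

theorem alt_body_eq (ranks : List (Int × Int)) (hne : ranks ≠ []) :
    normalize_ranks_alt ranks
      = BbodyF (PySem.List.sorted ranks (fun x => x.2) false) ranks.length := by
  have hsne : PySem.List.sorted ranks (fun x => x.2) false ≠ [] := by
    rw [Ne, PySem.List.sorted_eq_nil_iff]; exact hne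
  obtain ⟨⟨p, r⟩, t, hst⟩ := List.exists_cons_of_ne_nil hsne
  have hpair := PySem.List.sorted_pairwise ranks (fun x => x.2)
  rw [hst] at hpair
  have hpair' := hpair
  rw [List.pairwise_cons] at hpair'
  -- the grouping of the sorted list, expressed through its distinct keys
  have hG : pyGroups p r t = (keysC r t).map
      (fun d => (((PySem.List.sorted ranks (fun x => x.2) false)).filter
        (fun x => x.2 == d)).map (·.1)) := by
    rw [hst]
    exact pyGroups_eq_keys_filters t p r hpair
  have hKlt : (keysC r t).Pairwise (· < ·) :=
    keysC_pairwise t r hpair'.2 (fun x hx => hpair'.1 x hx)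
  have hKnd : (keysC r t).Nodup := hKlt.imp (fun h => ne_of_lt h)
  -- B's sorted distinct set is exactly keysC r t
  have hdistinct : PySem.List.sorted (PySem.Set.ofList (ranks.map (fun x => x.2)))
      (fun x => x) false = keysC r t := by
    apply PySem.List.sorted_eq_of_perm_of_pairwise_lt
    · apply List.perm_of_nodup_nodup_toFinset_eq hKnd (PySem.Set.nodup_ofList _)
      ext d
      simp only [List.mem_toFinset, PySem.Set.mem_ofList, keysC_mem]
      have hperm : (((p, r) :: t).map (fun x => x.2)).Perm (ranks.map (fun x => x.2)) := by
        refine List.Perm.map _ ?_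
        rw [← hst]
        exact PySem.List.sorted_perm ranks (fun x => x.2) false
      rw [← hperm.mem_iff]
      simp
    · exact hKlt
  have hrev : (PySem.List.slice? ranks none none (-1)).getD [] = ranks.reverse := by
    rw [PySem.List.slice?_none_none_neg_one]; rfl
  rcases List.eq_nil_or_concat (keysC r t) with hKnil | ⟨ks, lastd, hKc⟩
  · obtain ⟨tl, hK⟩ := keysC_head t r
    rw [hK] at hKnil
    simp at hKnil
  rw [List.concat_eq_append] at hKc
  -- reduce B's port
  simp only [normalize_ranks_alt, hdistinct, hrev, hKc, pyGet?_neg_one_concat,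
    PySem.List.slice_to_neg_one, List.dropLast_concat, PySem.List.foldl_append_eq_flatMap]
  -- reduce the reference form
  have hB : ((p, r) :: t).foldl bodyB ([], [], none)
      = ((groupsC [p] r t).1, (groupsC [p] r t).2.1, some (groupsC [p] r t).2.2) := by
    have h0 : bodyB ([], [], none) (p, r) = ([], [p], some r) := by simp [bodyB]
    rw [List.foldl_cons, h0, foldB_eq t [] [p] r (by simp)]
    simp
  rw [hst, BbodyF, hB]
  have hsplit := hG
  rw [pyGroups_eq, hKc, List.map_append, List.map_singleton] at hsplit
  obtain ⟨hgs, hc⟩ := List.append_singleton_inj.mp hsplit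
  dsimp only
  rw [hgs, hc]
  congr 1
  · exact (piece_eq ranks lastd ((ranks.length : Nat) : Int)).symm
  · refine (flatMap_enumerate_congr
      (fun i d => (ranks.reverse.filter (fun x => x.2 == d)).map (fun x => (x.1, i + 1)))
      (fun i g => g.reverse.map (fun pl => (pl, i + 1)))
      ks (ks.map (fun d => (((PySem.List.sorted ranks (fun x => x.2) false)).filter
        (fun x => x.2 == d)).map (·.1))) 0 (by simp) ?_)
    intro k h1 h2
    rw [List.getElem_map]
    exact (piece_eq ranks ks[k] (0 + (k : Int) + 1)).symm

theorem normalize_ranks_spec : Claim_equal_normalize_ranks := by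
  intro ranks _ hpre
  unfold Spec_normalize_ranks
  rw [normalize_ranks_eq_AbodyF, alt_body_eq ranks hpre]
  apply body_eq
  · simp [PySem.List.length_sorted]
  · intro h
    have := PySem.List.sorted_perm ranks (fun x => x.2) false
    rw [h] at this
    exact hpre (List.Perm.nil_eq this).symm
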